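-- pv_equiv track=rewrite | github.com/yousefahmedsafy/IntegratedMedicineTradeNameDetectionModel-main | OpticalCharacterRecognition.py | replace_zeros_between_letters
-- ===== SOURCE A (Python) =====
-- def replace_zeros_between_letters(input_str):
--     result = ''
--     for i in range(len(input_str)):
--         if input_str[i] == '0':
--             if i > 0 and i < len(input_str) - 1:
--                 if input_str[i-1].isalpha() and input_str[i+1].isalpha():
--                     result += 'O'
--                 else:
--                     result += input_str[i]
--             else:
--                 result += input_str[i]
--         else:
--             result += input_str[i]
--     return result
-- ===== SOURCE B (Python) =====
-- def replace_zeros_between_letters(input_str):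
--     buf = list(input_str)
--     last = len(input_str) - 1
--     i = input_str.find('0')
--     while i != -1:
--         if 0 < i < last and input_str[i-1].isalpha() and input_str[i+1].isalpha():
--             buf[i] = 'O'
--         i = input_str.find('0', i + 1)
--     return ''.join(buf)
-- ===== Notes on version B (the rewrite author's own statement) =====
-- stated objective: faster
-- what changed: Instead of rebuilding the string character by character with per-index neighbour checks, B copies the string into a mutable buffer once and jumps directly between the zero-digit occurrences via str.find, patching only those positions in place.
import Mathlib
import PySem

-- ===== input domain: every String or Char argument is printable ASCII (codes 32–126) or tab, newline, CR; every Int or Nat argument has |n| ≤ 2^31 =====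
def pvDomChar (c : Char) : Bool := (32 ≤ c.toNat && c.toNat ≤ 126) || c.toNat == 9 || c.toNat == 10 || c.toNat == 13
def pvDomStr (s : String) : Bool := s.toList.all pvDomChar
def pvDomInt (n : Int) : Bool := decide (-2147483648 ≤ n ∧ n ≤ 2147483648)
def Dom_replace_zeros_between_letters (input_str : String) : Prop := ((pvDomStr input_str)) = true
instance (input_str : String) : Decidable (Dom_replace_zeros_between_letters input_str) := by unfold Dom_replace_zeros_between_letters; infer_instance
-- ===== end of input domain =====

-- B replaces A's per-character rebuild (index loop, neighbour checks at every position) by copying the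
-- string into a buffer once and jumping between the zero-digit occurrences via str.find, patching in place;
-- objective: faster by a constant factor (work only at zero positions).


-- ===== PORT A =====
def replace_zeros_between_letters (input_str : String) : String :=
  let s := input_str.toList
  let n : Int := PySem.Chars.len s
  let result :=
    (PySem.List.pyRange 0 n 1).foldl (fun result i =>
      let c := PySem.List.pyGetD s i ' '
      if c = '0' then
        if 0 < i ∧ i < n - 1 then
          if PySem.Chars.isalpha (PySem.List.pyGetD s (i-1) ' ')
              && PySem.Chars.isalpha (PySem.List.pyGetD s (i+1) ' ') then
            result ++ ['O']
          else
            result ++ [c]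
        else
          result ++ [c]
      else
        result ++ [c]) ([] : List Char)
  String.ofList result

-- ===== PORT B =====
-- facts about str.find used only to justify the loop's indices and termination
theorem pv_prefix_drop (cs : List Char) (m : Nat) :
    ['0'] <+: cs.drop m ↔ cs[m]? = some '0' := by
  rw [← List.head?_drop]
  cases cs.drop m with
  | nil => simp
  | cons a t => simp [List.cons_prefix_cons, eq_comm]

theorem pv_next (cs : List Char) (i : Nat) (hi : i < cs.length)
    (h : PySem.Chars.findFrom cs ['0'] ((i : Int) + 1) none ≠ -1) :
    i < (PySem.Chars.findFrom cs ['0'] ((i : Int) + 1) none).toNat ∧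
    (PySem.Chars.findFrom cs ['0'] ((i : Int) + 1) none).toNat < cs.length ∧
    cs[(PySem.Chars.findFrom cs ['0'] ((i : Int) + 1) none).toNat]? = some '0' ∧
    (∀ m, i < m → m < (PySem.Chars.findFrom cs ['0'] ((i : Int) + 1) none).toNat →
        cs[m]? ≠ some '0') := by
  have hcast : ((i : Int) + 1) = ((i + 1 : Nat) : Int) := by push_cast; ring
  rw [hcast] at h ⊢
  obtain ⟨h1, h2, h3⟩ := PySem.Chars.findFrom_natCast_spec cs ['0'] (i+1) (by omega) h
  have hpd := (pv_prefix_drop cs _).mp h2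
  have hlt : (PySem.Chars.findFrom cs ['0'] ((i + 1 : Nat) : Int) none).toNat < cs.length := by
    by_contra hc
    have hn : cs[(PySem.Chars.findFrom cs ['0'] ((i + 1 : Nat) : Int) none).toNat]? = none :=
      List.getElem?_eq_none (by omega)
    rw [hn] at hpd
    simp at hpd
  refine ⟨by omega, hlt, hpd, ?_⟩
  intro m hm1 hm2 hc
  exact h3 m (by omega) (by omega) ((pv_prefix_drop cs m).mpr hc)

theorem pv_start (cs : List Char) (h : PySem.Chars.find cs ['0'] ≠ -1) :
    (PySem.Chars.find cs ['0']).toNat < cs.length ∧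
    cs[(PySem.Chars.find cs ['0']).toNat]? = some '0' ∧
    (∀ m, m < (PySem.Chars.find cs ['0']).toNat → cs[m]? ≠ some '0') := by
  have h0 : (0 : Int) ≤ PySem.Chars.find cs ['0'] := by
    have := PySem.Chars.neg_one_le_find cs ['0']; omega
  obtain ⟨h2, h3⟩ := PySem.Chars.find_spec (s := cs) (sub := ['0']) h0
  have hpd := (pv_prefix_drop cs _).mp h2
  have hlt : (PySem.Chars.find cs ['0']).toNat < cs.length := by
    by_contra hc
    have hn : cs[(PySem.Chars.find cs ['0']).toNat]? = none :=
      List.getElem?_eq_none (by omega)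
    rw [hn] at hpd
    simp at hpd
  exact ⟨hlt, hpd, fun m hm hc => h3 m hm ((pv_prefix_drop cs m).mpr hc)⟩

-- the while loop of B: patch position i (a '0'), then jump to the next '0' via find
def pvB_loop (cs : List Char) (buf : List Char) (i : Nat) (hi : i < cs.length) : List Char :=
  -- '0 < i < last and input_str[i-1].isalpha() and input_str[i+1].isalpha()'; the guard keeps i∓1 in range, so getD is exact
  let buf' := if 0 < i ∧ i + 1 < cs.length ∧
        (PySem.Chars.isalpha (cs.getD (i-1) ' ') && PySem.Chars.isalpha (cs.getD (i+1) ' ')) = true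
      then buf.set i 'O' else buf
  let nxt := PySem.Chars.findFrom cs ['0'] ((i : Int) + 1) none   -- input_str.find('0', i + 1)
  if h : nxt ≠ -1 then pvB_loop cs buf' nxt.toNat (pv_next cs i hi h).2.1 else buf'
termination_by cs.length - i
decreasing_by
  have := (pv_next cs i hi h).1
  omega

def replace_zeros_between_letters_alt (input_str : String) : String :=
  let cs := input_str.toList
  let buf := cs                                  -- buf = list(input_str)
  let i0 := PySem.Chars.find cs ['0']            -- i = input_str.find('0')
  if h : i0 ≠ -1 then String.ofList (pvB_loop cs buf i0.toNat (pv_start cs h).1)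
  else String.ofList buf                         -- while never entered

-- ===== PRECONDITION & SPEC =====
def Spec_replace_zeros_between_letters (input_str : String) (out : String) : Prop := out = replace_zeros_between_letters_alt input_str
instance (input_str : String) (out : String) : Decidable (Spec_replace_zeros_between_letters input_str out) := by unfold Spec_replace_zeros_between_letters; infer_instance

-- ===== CLAIM (what is proved, stated in full; the proofs are below) =====
def Claim_equal_replace_zeros_between_letters : Prop := ∀ (input_str : String), Dom_replace_zeros_between_letters input_str → Spec_replace_zeros_between_letters input_str (replace_zeros_between_letters input_str)

-- ===== LEMMAS AND PROOFS =====

-- the common normal form: the output character at position k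
def pvSpecChar (cs : List Char) (k : Nat) : Char :=
  if cs.getD k ' ' = '0' ∧ 0 < k ∧ k + 1 < cs.length ∧
      (PySem.Chars.isalpha (cs.getD (k-1) ' ') && PySem.Chars.isalpha (cs.getD (k+1) ' ')) = true
  then 'O' else cs.getD k ' '

theorem pv_getD_eq (cs : List Char) (k : Nat) (hk : k < cs.length) : cs.getD k ' ' = cs[k] := by
  simp [List.getD_eq_getElem?_getD, List.getElem?_eq_getElem hk]

theorem pv_getD_some (cs : List Char) (k : Nat) (hk : k < cs.length) :
    cs.getD k ' ' = '0' ↔ cs[k]? = some '0' := by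
  rw [pv_getD_eq cs k hk, List.getElem?_eq_getElem hk]
  simp

theorem pv_A_eq (cs : List Char) :
    (PySem.List.pyRange 0 (PySem.Chars.len cs) 1).foldl (fun result i =>
      let c := PySem.List.pyGetD cs i ' '
      if c = '0' then
        if 0 < i ∧ i < (PySem.Chars.len cs) - 1 then
          if PySem.Chars.isalpha (PySem.List.pyGetD cs (i-1) ' ')
              && PySem.Chars.isalpha (PySem.List.pyGetD cs (i+1) ' ') then
            result ++ ['O']
          else
            result ++ [c]
        else
          result ++ [c]
      else
        result ++ [c]) ([] : List Char)
    = (List.range cs.length).map (pvSpecChar cs) := by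
  have hbody : (fun (result : List Char) (i : Int) =>
      let c := PySem.List.pyGetD cs i ' '
      if c = '0' then
        if 0 < i ∧ i < (PySem.Chars.len cs) - 1 then
          if PySem.Chars.isalpha (PySem.List.pyGetD cs (i-1) ' ')
              && PySem.Chars.isalpha (PySem.List.pyGetD cs (i+1) ' ') then
            result ++ ['O']
          else
            result ++ [c]
        else
          result ++ [c]
      else
        result ++ [c])
      = (fun result i => result ++ [(fun (i : Int) =>
          let c := PySem.List.pyGetD cs i ' '
          if c = '0' then
            if 0 < i ∧ i < (PySem.Chars.len cs) - 1 then
              if PySem.Chars.isalpha (PySem.List.pyGetD cs (i-1) ' ')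
                  && PySem.Chars.isalpha (PySem.List.pyGetD cs (i+1) ' ') then
                'O'
              else c
            else c
          else c) i]) := by
    funext r i
    simp only
    split_ifs <;> rfl
  rw [hbody, PySem.List.foldl_append_singleton_eq_map, List.nil_append]
  have hlen : PySem.Chars.len cs = (cs.length : Int) := by simp
  apply List.ext_getElem
  · simp [PySem.List.length_pyRange_one]
  · intro k h1 h2
    have hk : k < cs.length := by
      simp [PySem.List.length_pyRange_one] at h1; omega
    rw [List.getElem_map, List.getElem_map, PySem.List.getElem_pyRange_one, List.getElem_range]
    simp only [zero_add]
    have hc : PySem.List.pyGetD cs (k : Int) ' ' = cs[k] := by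
      rw [PySem.List.pyGetD_eq_getElem cs ' ' (by omega) (by exact_mod_cast hk)]
      simp
    have hg : cs.getD k ' ' = cs[k] := pv_getD_eq cs k hk
    unfold pvSpecChar
    rw [hg]
    by_cases h0 : cs[k] = '0'
    · by_cases hmid : 0 < k ∧ k + 1 < cs.length
      · have hgI : 0 < (k : Int) ∧ (k : Int) < PySem.Chars.len cs - 1 := by
          rw [hlen]; constructor <;> [omega; omega]
        have hkm : k - 1 < cs.length := by omega
        have hcm : PySem.List.pyGetD cs ((k : Int) - 1) ' ' = cs.getD (k-1) ' ' := by
          have h1' : ((k : Int) - 1) = ((k - 1 : Nat) : Int) := by omega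
          rw [h1', PySem.List.pyGetD_eq_getElem cs ' ' (by omega) (by exact_mod_cast hkm),
            pv_getD_eq cs (k-1) hkm]
          simp
        have hcp : PySem.List.pyGetD cs ((k : Int) + 1) ' ' = cs.getD (k+1) ' ' := by
          have h1' : ((k : Int) + 1) = ((k + 1 : Nat) : Int) := by push_cast; ring
          rw [h1', PySem.List.pyGetD_eq_getElem cs ' ' (by omega) (by exact_mod_cast hmid.2),
            pv_getD_eq cs (k+1) hmid.2]
          simp
        simp only [hc, if_pos h0, if_pos hgI, hcm, hcp]
        cases hA : (PySem.Chars.isalpha (cs.getD (k-1) ' ') && PySem.Chars.isalpha (cs.getD (k+1) ' ')) with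
        | true => rw [if_pos rfl, if_pos ⟨h0, hmid.1, hmid.2, rfl⟩]
        | false =>
            rw [if_neg (by simp), if_neg (by rintro ⟨-, -, -, hh⟩; exact Bool.noConfusion hh)]
      · have hgI : ¬ (0 < (k : Int) ∧ (k : Int) < PySem.Chars.len cs - 1) := by
          rw [hlen]; omega
        simp only [hc, if_pos h0, if_neg hgI]
        rw [if_neg (by rintro ⟨-, hk1, hk2, -⟩; exact hmid ⟨hk1, hk2⟩)]
    · simp only [hc, if_neg h0]
      rw [if_neg (by rintro ⟨hh, -⟩; exact h0 hh)]

-- one loop iteration establishes the invariant strictly beyond i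
theorem pv_step (cs buf : List Char) (i : Nat) (hi : i < cs.length)
    (hz : cs.getD i ' ' = '0') (hlen : buf.length = cs.length)
    (hInv : ∀ k, k < cs.length →
      (i ≤ k ∧ cs.getD k ' ' = '0' ∧ buf.getD k ' ' = '0') ∨ buf.getD k ' ' = pvSpecChar cs k) :
    (if 0 < i ∧ i + 1 < cs.length ∧
        (PySem.Chars.isalpha (cs.getD (i-1) ' ') && PySem.Chars.isalpha (cs.getD (i+1) ' ')) = true
      then buf.set i 'O' else buf).length = cs.length ∧
    (∀ k, k < cs.length →
      (i < k ∧ cs.getD k ' ' = '0' ∧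
        (if 0 < i ∧ i + 1 < cs.length ∧
            (PySem.Chars.isalpha (cs.getD (i-1) ' ') && PySem.Chars.isalpha (cs.getD (i+1) ' ')) = true
          then buf.set i 'O' else buf).getD k ' ' = '0') ∨
      (if 0 < i ∧ i + 1 < cs.length ∧
          (PySem.Chars.isalpha (cs.getD (i-1) ' ') && PySem.Chars.isalpha (cs.getD (i+1) ' ')) = true
        then buf.set i 'O' else buf).getD k ' ' = pvSpecChar cs k) := by
  constructor
  · split_ifs <;> simp [hlen]
  · intro k hk
    by_cases hki : k = i
    · subst hki
      right
      by_cases hP : 0 < k ∧ k + 1 < cs.length ∧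
          (PySem.Chars.isalpha (cs.getD (k-1) ' ') && PySem.Chars.isalpha (cs.getD (k+1) ' ')) = true
      · rw [if_pos hP]
        have hset : (buf.set k 'O').getD k ' ' = 'O' := by
          rw [pv_getD_eq _ k (by simp [hlen, hk])]
          simp [List.getElem_set_self]
        rw [hset, pvSpecChar, if_pos ⟨hz, hP.1, hP.2.1, hP.2.2⟩]
      · rw [if_neg hP]
        have hspec : pvSpecChar cs k = '0' := by
          rw [pvSpecChar, if_neg (by rintro ⟨-, h1, h2, h3⟩; exact hP ⟨h1, h2, h3⟩)]
          exact hz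
        rcases hInv k hk with ⟨-, -, hb⟩ | hb
        · rw [hspec]; exact hb
        · exact hb
    · have hbk : (if 0 < i ∧ i + 1 < cs.length ∧
          (PySem.Chars.isalpha (cs.getD (i-1) ' ') && PySem.Chars.isalpha (cs.getD (i+1) ' ')) = true
        then buf.set i 'O' else buf).getD k ' ' = buf.getD k ' ' := by
        split_ifs
        · simp [List.getD_eq_getElem?_getD, List.getElem?_set_ne (fun h => hki h.symm)]
        · rfl
      rw [hbk]
      rcases hInv k hk with ⟨hik, hzk, hbz⟩ | hs
      · exact Or.inl ⟨lt_of_le_of_ne hik (fun h => hki h.symm), hzk, hbz⟩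
      · exact Or.inr hs

theorem pv_loop (cs buf : List Char) (i : Nat) (hi : i < cs.length)
    (hz : cs.getD i ' ' = '0') (hlen : buf.length = cs.length)
    (hInv : ∀ k, k < cs.length →
      (i ≤ k ∧ cs.getD k ' ' = '0' ∧ buf.getD k ' ' = '0') ∨ buf.getD k ' ' = pvSpecChar cs k) :
    pvB_loop cs buf i hi = (List.range cs.length).map (pvSpecChar cs) := by
  obtain ⟨hlen', hInv'⟩ := pv_step cs buf i hi hz hlen hInv
  rw [pvB_loop]
  by_cases h : PySem.Chars.findFrom cs ['0'] ((i : Int) + 1) none ≠ -1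
  · rw [dif_pos h]
    obtain ⟨hij, hjl, hjz, hjmin⟩ := pv_next cs i hi h
    apply pv_loop cs _ _ _ ((pv_getD_some cs _ hjl).mpr hjz) hlen'
    intro k hk
    rcases hInv' k hk with ⟨hik, hzk, hbz⟩ | hs
    · left
      refine ⟨?_, hzk, hbz⟩
      by_contra hc
      exact hjmin k hik (by omega) ((pv_getD_some cs k hk).mp hzk)
    · exact Or.inr hs
  · rw [dif_neg h]
    have heq : PySem.Chars.findFrom cs ['0'] ((i : Int) + 1) none = -1 := by
      by_contra hc; exact h hc
    have hcast : ((i : Int) + 1) = ((i + 1 : Nat) : Int) := by push_cast; ring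
    rw [hcast] at heq
    have hnone : ∀ m, i < m → m < cs.length → cs.getD m ' ' ≠ '0' := by
      intro m hm1 hm2 hzm
      have hpre : ['0'] <+: (cs.drop (i+1)).drop (m - (i+1)) := by
        rw [List.drop_drop]
        have : i + 1 + (m - (i + 1)) = m := by omega
        rw [this]
        exact (pv_prefix_drop cs m).mpr ((pv_getD_some cs m hm2).mp hzm)
      have hinf : ['0'] <:+: cs.drop (i+1) :=
        (PySem.Chars.isIn_iff_infix _ _).mp
          ((PySem.Chars.exists_prefix_drop_iff_isIn _ _).mp ⟨m - (i+1), hpre⟩)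
      exact ((PySem.Chars.findFrom_natCast_eq_neg_one_iff cs ['0'] (i+1) (by omega)).mp heq) hinf
    apply List.ext_getElem
    · rw [hlen']; simp
    · intro k hk1 hk2
      have hk : k < cs.length := by omega
      rw [List.getElem_map, List.getElem_range]
      rw [← pv_getD_eq _ k (by omega)]
      rcases hInv' k hk with ⟨hik, hzk, -⟩ | hs
      · exact absurd hzk (hnone k hik hk)
      · exact hs
termination_by cs.length - i
decreasing_by
  have := (pv_next cs i hi h).1
  have := (pv_next cs i hi h).2.1
  omega

theorem pv_B_eq (s : String) :
    replace_zeros_between_letters_alt s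
      = String.ofList ((List.range s.toList.length).map (pvSpecChar s.toList)) := by
  unfold replace_zeros_between_letters_alt
  by_cases h : PySem.Chars.find s.toList ['0'] ≠ -1
  · rw [dif_pos h]
    congr 1
    obtain ⟨hlt, hz0, hmin⟩ := pv_start s.toList h
    apply pv_loop _ _ _ hlt ((pv_getD_some _ _ hlt).mpr hz0) rfl
    intro k hk
    by_cases hzk : s.toList.getD k ' ' = '0'
    · left
      refine ⟨?_, hzk, hzk⟩
      by_contra hc
      exact hmin k (by omega) ((pv_getD_some _ k hk).mp hzk)
    · right
      rw [pvSpecChar, if_neg (by rintro ⟨hh, -⟩; exact hzk hh)]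
  · rw [dif_neg h]
    congr 1
    have heq : PySem.Chars.find s.toList ['0'] = -1 := by by_contra hc; exact h hc
    have hnone : ∀ m, m < s.toList.length → s.toList.getD m ' ' ≠ '0' := by
      intro m hm hzm
      have hinf : ['0'] <:+: s.toList :=
        (PySem.Chars.isIn_iff_infix _ _).mp
          ((PySem.Chars.exists_prefix_drop_iff_isIn _ _).mp
            ⟨m, (pv_prefix_drop _ m).mpr ((pv_getD_some _ m hm).mp hzm)⟩)
      exact ((PySem.Chars.find_eq_neg_one_iff _ _).mp heq) hinf
    apply List.ext_getElem
    · simp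
    · intro k hk1 hk2
      rw [List.getElem_map, List.getElem_range, pvSpecChar,
        if_neg (by rintro ⟨hh, -⟩; exact hnone k (by omega) hh)]
      exact (pv_getD_eq _ k (by omega)).symm

-- ===== VERDICT (by name: the statement is the Claim_ definition above) =====
theorem replace_zeros_between_letters_spec : Claim_equal_replace_zeros_between_letters := by
  intro s _
  unfold Spec_replace_zeros_between_letters
  have hA : replace_zeros_between_letters s
      = String.ofList ((List.range s.toList.length).map (pvSpecChar s.toList)) := by
    unfold replace_zeros_between_letters
    exact congrArg String.ofList (pv_A_eq s.toList)
  rw [hA, pv_B_eq s]
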